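-- pv_equiv track=rewrite | github.com/OmaDev2/tube2_new | utils/video_processing.py | _distribute_overlays_per_clip
-- ===== SOURCE A (Python) =====
-- from typing import Dict, List, Optional
--
-- def _distribute_overlays_per_clip(overlays_ui: List[tuple], num_clips: int) -> List[Optional[List[tuple]]]:
--     """
--     Distribuye los overlays seleccionados entre los clips disponibles.
--
--     Por ejemplo, si tienes overlays [sunlight-lens.webm, super8.webm] y 4 clips:
--     - Clip 1: sunlight-lens.webm
--     - Clip 2: super8.webm
--     - Clip 3: sunlight-lens.webm
--     - Clip 4: super8.webm
--     """
--     if not overlays_ui or num_clips <= 0: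
--         return None
--
--     overlays_per_clip = []
--
--     for i in range(num_clips):
--         if overlays_ui:
--             # Ciclar entre los overlays disponibles
--             overlay_index = i % len(overlays_ui)
--             selected_overlay = overlays_ui[overlay_index]
--
--             # Cada clip tendrá una lista con un solo overlay
--             overlays_per_clip.append([selected_overlay])
--         else:
--             overlays_per_clip.append(None)
--
--     return overlays_per_clip
-- ===== SOURCE B (Python) =====
-- def _distribute_overlays_per_clip(overlays_ui, num_clips):
--     if not overlays_ui or num_clips <= 0:
--         return None
--     reps = num_clips // len(overlays_ui) + 1
--     tiled = (overlays_ui * reps)[:num_clips]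
--     return [[ov] for ov in tiled]
-- ===== Notes on version B (the rewrite author's own statement) =====
-- stated objective: alternative
-- what changed: Replaces the per-index loop with modulo lookup (overlays_ui[i % len]) by tiling: repeat the overlay list enough times, slice it to num_clips, and wrap each element in a singleton list.
import Mathlib
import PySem

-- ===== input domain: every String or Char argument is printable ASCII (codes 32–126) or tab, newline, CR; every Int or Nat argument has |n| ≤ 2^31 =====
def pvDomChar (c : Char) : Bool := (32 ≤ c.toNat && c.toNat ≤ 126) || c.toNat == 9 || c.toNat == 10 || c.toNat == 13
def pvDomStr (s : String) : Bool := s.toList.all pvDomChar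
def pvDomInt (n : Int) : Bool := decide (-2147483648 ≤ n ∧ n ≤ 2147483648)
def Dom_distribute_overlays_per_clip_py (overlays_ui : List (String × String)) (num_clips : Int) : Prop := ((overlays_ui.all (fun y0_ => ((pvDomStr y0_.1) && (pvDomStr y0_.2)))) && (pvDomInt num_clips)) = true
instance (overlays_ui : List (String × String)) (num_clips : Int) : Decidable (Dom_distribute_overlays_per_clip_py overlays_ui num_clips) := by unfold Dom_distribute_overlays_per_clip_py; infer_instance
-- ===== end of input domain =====

-- B rewrites A's per-index modulo loop as tile-then-slice (alternative decomposition, same cost).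

-- ===== PORT A =====
def distribute_overlays_per_clip_py (overlays_ui : List (String × String)) (num_clips : Int) : Option (List (Option (List (String × String)))) :=
  if overlays_ui = [] ∨ num_clips ≤ 0 then none
  else
    some ((PySem.List.pyRange 0 num_clips 1).foldl
      (fun acc i =>
        if overlays_ui ≠ [] then
          -- overlay_index = i % len is always in range, so pyGet? is `some`; the getD default is never used
          acc ++ [some [(PySem.List.pyGet? overlays_ui (PySem.Int.mod i (overlays_ui.length : Int))).getD ("", "")]]
        else acc ++ [none]) [])

-- ===== PORT B =====
def distribute_overlays_per_clip_py_alt (overlays_ui : List (String × String)) (num_clips : Int) : Option (List (Option (List (String × String)))) :=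
  if overlays_ui = [] ∨ num_clips ≤ 0 then none
  else
    -- reps = num_clips // len + 1; Python `overlays_ui * reps` (here reps ≥ 1) is the flattened replication, `[:num_clips]` the slice
    some ((PySem.List.slice ((List.replicate (PySem.Int.floordiv num_clips (overlays_ui.length : Int) + 1).toNat overlays_ui).flatten) none (some num_clips)).map (fun ov => some [ov]))

-- ===== PRECONDITION & SPEC =====
def Spec_distribute_overlays_per_clip_py (overlays_ui : List (String × String)) (num_clips : Int) (out : Option (List (Option (List (String × String))))) : Prop := out = distribute_overlays_per_clip_py_alt overlays_ui num_clips
instance (overlays_ui : List (String × String)) (num_clips : Int) (out : Option (List (Option (List (String × String))))) : Decidable (Spec_distribute_overlays_per_clip_py overlays_ui num_clips out) := by unfold Spec_distribute_overlays_per_clip_py; infer_instance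

-- ===== CLAIM (what is proved, stated in full; the proofs are below) =====
def Claim_equal_distribute_overlays_per_clip_py : Prop := ∀ (overlays_ui : List (String × String)) (num_clips : Int), Dom_distribute_overlays_per_clip_py overlays_ui num_clips → Spec_distribute_overlays_per_clip_py overlays_ui num_clips (distribute_overlays_per_clip_py overlays_ui num_clips)

-- ===== LEMMAS AND PROOFS =====

-- indexing into the flattening of a replicated list is indexing modulo the block length
theorem pvFlatRep_getElem? {α : Type} (xs : List α) : ∀ (r i : ℕ), i < r * xs.length →
    ((List.replicate r xs).flatten)[i]? = xs[i % xs.length]? := by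
  intro r
  induction r with
  | zero => intro i h; omega
  | succ r ih =>
    intro i h
    rw [Nat.succ_mul] at h
    rw [List.replicate_succ, List.flatten_cons]
    by_cases hi : i < xs.length
    · rw [List.getElem?_append_left hi, Nat.mod_eq_of_lt hi]
    · have hle : xs.length ≤ i := by omega
      rw [List.getElem?_append_right hle, ih (i - xs.length) (by omega)]
      conv_rhs => rw [← Nat.sub_add_cancel hle, Nat.add_mod_right]

-- the tiled-and-truncated list is exactly the modulo-indexed enumeration
theorem pvTiled_eq {α : Type} [Inhabited α] (xs : List α) (d : α) (n r : ℕ) (hn : n ≤ r * xs.length) :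
    ((List.replicate r xs).flatten).take n = (List.range n).map (fun k => xs.getD (k % xs.length) d) := by
  apply List.ext_getElem?
  intro i
  by_cases hi : i < n
  · rw [List.getElem?_take]
    simp only [hi, if_pos]
    rw [pvFlatRep_getElem? xs r i (lt_of_lt_of_le hi hn)]
    have hlen : 0 < xs.length := by
      rcases Nat.eq_zero_or_pos xs.length with h0 | h0
      · rw [h0, Nat.mul_zero] at hn; omega
      · exact h0
    have hm : i % xs.length < xs.length := Nat.mod_lt _ hlen
    rw [List.getElem?_map, List.getElem?_range hi]
    simp [List.getElem?_eq_getElem hm]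
  · rw [List.getElem?_take]
    simp [hi]

theorem distribute_overlays_spec_aux (overlays_ui : List (String × String)) (num_clips : Int) :
    distribute_overlays_per_clip_py overlays_ui num_clips = distribute_overlays_per_clip_py_alt overlays_ui num_clips := by
  unfold distribute_overlays_per_clip_py distribute_overlays_per_clip_py_alt
  by_cases hg : overlays_ui = [] ∨ num_clips ≤ 0
  · simp [hg]
  · have hx : overlays_ui ≠ [] := fun h => hg (Or.inl h)
    have hpos : 0 < num_clips := lt_of_not_ge (fun h => hg (Or.inr h))
    rw [if_neg hg, if_neg hg]
    set n : ℕ := num_clips.toNat with hn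
    have hnc : num_clips = (n : Int) := by omega
    have hlen : 0 < overlays_ui.length := List.length_pos_iff.mpr hx
    -- B side
    have hreps : (PySem.Int.floordiv num_clips (overlays_ui.length : Int) + 1).toNat
        = n / overlays_ui.length + 1 := by
      rw [hnc, PySem.Int.floordiv_natCast,
        show ((n / overlays_ui.length : ℕ) : Int) + 1 = ((n / overlays_ui.length + 1 : ℕ) : Int) by push_cast; ring,
        Int.toNat_natCast]
    have hbound : n ≤ (n / overlays_ui.length + 1) * overlays_ui.length := by
      have hdm := Nat.div_add_mod n overlays_ui.length
      have hm : n % overlays_ui.length < overlays_ui.length := Nat.mod_lt _ hlen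
      have hc : (n / overlays_ui.length + 1) * overlays_ui.length
          = overlays_ui.length * (n / overlays_ui.length) + overlays_ui.length := by ring
      omega
    rw [PySem.List.slice_to _ (by omega), hreps, hnc, Int.toNat_natCast]
    rw [pvTiled_eq overlays_ui ("", "") n (n / overlays_ui.length + 1) hbound]
    -- A side
    rw [PySem.List.pyRange_one]
    simp only [Int.sub_zero, Int.toNat_natCast, List.foldl_map, List.map_map]
    have hbody : ∀ (acc : List (Option (List (String × String)))) (k : ℕ),
        (if overlays_ui ≠ [] then
          acc ++ [some [(PySem.List.pyGet? overlays_ui (PySem.Int.mod ((0:Int) + (k:Int)) (overlays_ui.length : Int))).getD ("", "")]]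
        else acc ++ [none])
        = acc ++ [some [overlays_ui.getD (k % overlays_ui.length) ("", "")]] := by
      intro acc k
      rw [if_pos hx]
      have : PySem.Int.mod ((0:Int) + (k:Int)) (overlays_ui.length : Int) = ((k % overlays_ui.length : ℕ) : Int) := by
        rw [zero_add]; exact PySem.Int.mod_natCast k overlays_ui.length
      rw [this, PySem.List.pyGet?_natCast, ← List.getD_eq_getElem?_getD]
    simp only [hbody]
    rw [PySem.List.foldl_append_singleton_eq_map]
    simp [Function.comp]

-- ===== VERDICT (by name: the statement is the Claim_ definition above) =====
theorem distribute_overlays_per_clip_py_spec : Claim_equal_distribute_overlays_per_clip_py := by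
  intro overlays_ui num_clips _
  exact distribute_overlays_spec_aux overlays_ui num_clips
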